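-- pv_equiv track=rewrite | github.com/mauricio-opus10/usp-bia-tcc | gerar_figuras_tcc.py | _identify_blocs
-- ===== SOURCE A (Python) =====
-- COW_GERMANY = 255
--
-- COW_USA = 2
--
-- COW_FRANCE = 220
--
-- COW_UK = 200
--
-- COW_RUSSIA = 365
--
-- def _identify_blocs(partition: dict, period: str) -> dict:
--     """Identifica nomes dos blocos baseado nos membros-chave."""
--     comm_members = {}
--     for node, comm_id in partition.items():
--         comm_members.setdefault(comm_id, set()).add(node)
--
--     bloc_names = {}
--     if period == 'pre_wwi':
--         for cid, members in comm_members.items():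
--             if COW_GERMANY in members:
--                 bloc_names[cid] = 'Potências Centrais'
--             elif COW_UK in members:
--                 bloc_names[cid] = 'Bloco Anglo-Saxão'
--             elif COW_FRANCE in members or COW_RUSSIA in members:
--                 bloc_names[cid] = 'Bloco Franco-Russo'
--             else:
--                 bloc_names[cid] = f'Comunidade {cid}'
--     else:
--         for cid, members in comm_members.items():
--             if COW_GERMANY in members:
--                 bloc_names[cid] = 'Eixo'
--             elif COW_USA in members and COW_FRANCE not in members:
--                 bloc_names[cid] = 'Bloco Americano'
--             elif COW_FRANCE in members or COW_UK in members:
--                 bloc_names[cid] = 'Aliados'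
--             else:
--                 bloc_names[cid] = f'Comunidade {cid}'
--     return bloc_names
-- ===== SOURCE B (Python) =====
-- COW_GERMANY = 255
-- COW_USA = 2
-- COW_FRANCE = 220
-- COW_UK = 200
-- COW_RUSSIA = 365
--
-- def _identify_blocs(partition: dict, period: str) -> dict:
--     """Identifica nomes dos blocos baseado nos membros-chave.
--
--     Algoritmo diferente: uma tabela de prioridade (nó-chave -> (rank, rótulo))
--     e um único passe de streaming que mantém, por comunidade, o menor rank
--     visto. A cláusula 'EUA e não França' do período pós vira pura ordem de
--     prioridade (França rank 1 < EUA rank 2, ambas antes do Reino Unido).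
--     """
--     if period == 'pre_wwi':
--         rank = {COW_GERMANY: (0, 'Potências Centrais'),
--                 COW_UK: (1, 'Bloco Anglo-Saxão'),
--                 COW_FRANCE: (2, 'Bloco Franco-Russo'),
--                 COW_RUSSIA: (2, 'Bloco Franco-Russo')}
--     else:
--         rank = {COW_GERMANY: (0, 'Eixo'),
--                 COW_FRANCE: (1, 'Aliados'),
--                 COW_USA: (2, 'Bloco Americano'),
--                 COW_UK: (3, 'Aliados')}
--     best = {}
--     for node, cid in partition.items():
--         old = best.get(cid, (4, None))
--         r = rank.get(node)
--         best[cid] = r if r is not None and r[0] < old[0] else old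
--     return {cid: (f'Comunidade {cid}' if label is None else label)
--             for cid, (_, label) in best.items()}
-- ===== Notes on version B (the rewrite author's own statement) =====
-- stated objective: alternative
-- what changed: B replaces A's per-community member-set dictionary and branch tree by a key-node priority table (node -> (rank,label)) and one streaming pass that keeps the minimum rank seen per community; the post-period clause 'USA and not FRANCE' becomes pure rank order (France=1 ahead of USA=2), so no branch tree remains.
import Mathlib
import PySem

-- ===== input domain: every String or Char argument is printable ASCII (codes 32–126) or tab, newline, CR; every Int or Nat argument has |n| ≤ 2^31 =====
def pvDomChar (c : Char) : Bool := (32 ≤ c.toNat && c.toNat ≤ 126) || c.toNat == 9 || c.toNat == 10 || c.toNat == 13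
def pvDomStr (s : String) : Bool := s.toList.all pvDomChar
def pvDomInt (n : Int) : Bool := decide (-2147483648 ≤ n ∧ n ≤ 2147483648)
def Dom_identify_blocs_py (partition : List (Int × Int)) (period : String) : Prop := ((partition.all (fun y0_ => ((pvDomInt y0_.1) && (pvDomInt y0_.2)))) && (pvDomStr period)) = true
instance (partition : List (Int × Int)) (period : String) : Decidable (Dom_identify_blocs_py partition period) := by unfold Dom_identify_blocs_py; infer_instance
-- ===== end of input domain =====

-- B replaces A's per-community member sets + branch tree by a key-node priority table and one streaming min-rank pass (return-value equivalence on dict inputs, i.e. distinct node keys).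

-- ===== PORT A =====
-- literal transliteration of _identify_blocs: build comm_members (dict cid → set of nodes), then label each community.
def identify_blocs_py (partition : List (Int × Int)) (period : String) : List (Int × String) :=
  let comm_members : PySem.Dict Int (PySem.Set Int) :=
    partition.foldl (fun d p => d.insert p.2 (PySem.Set.add (d.getD p.2 PySem.Set.empty) p.1)) PySem.Dict.empty
  let bloc_names : PySem.Dict Int String :=
    if period = "pre_wwi" then
      comm_members.items.foldl (fun bn p =>
        if PySem.Set.contains p.2 255 then bn.insert p.1 "Potências Centrais"
        else if PySem.Set.contains p.2 200 then bn.insert p.1 "Bloco Anglo-Saxão"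
        else if PySem.Set.contains p.2 220 || PySem.Set.contains p.2 365 then bn.insert p.1 "Bloco Franco-Russo"
        else bn.insert p.1 ("Comunidade " ++ PySem.Int.toStr p.1)) PySem.Dict.empty
    else
      comm_members.items.foldl (fun bn p =>
        if PySem.Set.contains p.2 255 then bn.insert p.1 "Eixo"
        else if PySem.Set.contains p.2 2 && !PySem.Set.contains p.2 220 then bn.insert p.1 "Bloco Americano"
        else if PySem.Set.contains p.2 220 || PySem.Set.contains p.2 200 then bn.insert p.1 "Aliados"
        else bn.insert p.1 ("Comunidade " ++ PySem.Int.toStr p.1)) PySem.Dict.empty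
  bloc_names.items

-- ===== PORT B =====
-- the priority table of Source B: key node → (rank, label); a dict literal with distinct keys
def pvPreTable : PySem.Dict Int (Int × String) :=
  PySem.Dict.mk [(255, (0, "Potências Centrais")), (200, (1, "Bloco Anglo-Saxão")),
                 (220, (2, "Bloco Franco-Russo")), (365, (2, "Bloco Franco-Russo"))]
def pvPostTable : PySem.Dict Int (Int × String) :=
  PySem.Dict.mk [(255, (0, "Eixo")), (220, (1, "Aliados")),
                 (2, (2, "Bloco Americano")), (200, (3, "Aliados"))]
def pvRankTable (period : String) : PySem.Dict Int (Int × String) :=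
  if period = "pre_wwi" then pvPreTable else pvPostTable

-- one loop step of Source B: best[cid] = r if r is not None and r[0] < old[0] else old
def pvStep (rank : PySem.Dict Int (Int × String)) (b : PySem.Dict Int (Int × Option String)) (p : Int × Int) : PySem.Dict Int (Int × Option String) :=
  b.insert p.2 (match rank.get? p.1 with
    | some r => if r.1 < (b.getD p.2 (4, none)).1 then (r.1, some r.2) else b.getD p.2 (4, none)
    | none => b.getD p.2 (4, none))

def identify_blocs_py_alt (partition : List (Int × Int)) (period : String) : List (Int × String) :=
  let rank := pvRankTable period
  let best : PySem.Dict Int (Int × Option String) := partition.foldl (pvStep rank) PySem.Dict.empty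
  best.items.map (fun p => (p.1, match p.2.2 with
    | some l => l
    | none => "Comunidade " ++ PySem.Int.toStr p.1))

-- ===== PRECONDITION & SPEC =====
-- Pre_ requires distinct node keys: the association list stands for A's Python dict argument, whose keys
-- are distinct by construction; a duplicate-key list represents no dict input of A.
def Pre_identify_blocs_py (partition : List (Int × Int)) (period : String) : Prop :=
  (partition.map Prod.fst).Nodup
instance (partition : List (Int × Int)) (period : String) : Decidable (Pre_identify_blocs_py partition period) := by unfold Pre_identify_blocs_py; infer_instance

def pvWitness_identify_blocs_py : (List (Int × Int)) × String := ([(255, 0), (2, 1), (220, 2)], "pre_wwi")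

def Spec_identify_blocs_py (partition : List (Int × Int)) (period : String) (out : List (Int × String)) : Prop := out = identify_blocs_py_alt partition period
instance (partition : List (Int × Int)) (period : String) (out : List (Int × String)) : Decidable (Spec_identify_blocs_py partition period out) := by unfold Spec_identify_blocs_py; infer_instance

-- ===== CLAIM (what is proved, stated in full; the proofs are below) =====
def Claim_equal_identify_blocs_py : Prop := ∀ (partition : List (Int × Int)) (period : String), Dom_identify_blocs_py partition period → Pre_identify_blocs_py partition period → Spec_identify_blocs_py partition period (identify_blocs_py partition period)

-- ===== LEMMAS AND PROOFS =====

-- the grouping fold's value at a community id c is the set of nodes whose pair carries c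
theorem pv_group_getD (l : List (Int × Int)) (d : PySem.Dict Int (PySem.Set Int)) (c : Int) :
    (l.foldl (fun d p => d.insert p.2 (PySem.Set.add (d.getD p.2 PySem.Set.empty) p.1)) d).getD c PySem.Set.empty
      = PySem.Set.update (d.getD c PySem.Set.empty) ((l.filter (fun p => p.2 == c)).map Prod.fst) := by
  induction l generalizing d with
  | nil => simp [PySem.Set.update]
  | cons hd tl ih =>
    simp only [List.foldl_cons, ih, List.filter_cons]
    by_cases h : hd.2 = c
    · simp [h, PySem.Set.update]
    · simp [h, PySem.Dict.getD_insert, Ne.symm h]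

-- B's min-fold's value at a community id c is the fold of the step over that community's nodes
theorem pv_step_getD (rank : PySem.Dict Int (Int × String)) (l : List (Int × Int)) (d : PySem.Dict Int (Int × Option String)) (c : Int) :
    (l.foldl (pvStep rank) d).getD c (4, none)
      = ((l.filter (fun p => p.2 == c)).map Prod.fst).foldl
          (fun old n => match rank.get? n with
            | some r => if r.1 < old.1 then (r.1, some r.2) else old
            | none => old) (d.getD c (4, none)) := by
  induction l generalizing d with
  | nil => simp
  | cons hd tl ih =>
    simp only [List.foldl_cons, ih, List.filter_cons]
    by_cases h : hd.2 = c
    · simp [h, pvStep]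
    · simp [h, pvStep, PySem.Dict.getD_insert, Ne.symm h]

-- a fold of fresh-key inserts over the community items just maps the label over them
theorem pv_fold_label (l : List (Int × PySem.Set Int)) (hl : (l.map Prod.fst).Nodup)
    (F : Int → PySem.Set Int → String) :
    (l.foldl (fun bn p => bn.insert p.1 (F p.1 p.2)) PySem.Dict.empty).items
      = l.map (fun p => (p.1, F p.1 p.2)) := by
  have h := PySem.Dict.items_foldl_insert_fresh (l := l) (k := Prod.fst)
    (v := fun p => F p.1 p.2) (d := PySem.Dict.empty) (by intro a _; simp) hl
  simpa using h

-- closed forms of the streaming min over a member list, per period table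
def pvBPre (ms : List Int) : Int × Option String :=
  if 255 ∈ ms then (0, some "Potências Centrais")
  else if 200 ∈ ms then (1, some "Bloco Anglo-Saxão")
  else if 220 ∈ ms ∨ 365 ∈ ms then (2, some "Bloco Franco-Russo")
  else (4, none)

def pvBPost (ms : List Int) : Int × Option String :=
  if 255 ∈ ms then (0, some "Eixo")
  else if 220 ∈ ms then (1, some "Aliados")
  else if 2 ∈ ms then (2, some "Bloco Americano")
  else if 200 ∈ ms then (3, some "Aliados")
  else (4, none)

def pvHPre (h : Int) : Int × Option String := pvBPre [h]
def pvHPost (h : Int) : Int × Option String := pvBPost [h]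

def pvGPre : Int × Option String → Int → Int × Option String :=
  fun old n => match pvPreTable.get? n with
    | some r => if r.1 < old.1 then (r.1, some r.2) else old
    | none => old

def pvGPost : Int × Option String → Int → Int × Option String :=
  fun old n => match pvPostTable.get? n with
    | some r => if r.1 < old.1 then (r.1, some r.2) else old
    | none => old

theorem pv_pre_rother (h : Int) (h1 : h ≠ 255) (h2 : h ≠ 200) (h3 : h ≠ 220) (h4 : h ≠ 365) :
    pvPreTable.get? h = none := by
  simp [pvPreTable, PySem.Dict.get?, List.find?, beq_false_of_ne (Ne.symm h1),
    beq_false_of_ne (Ne.symm h2), beq_false_of_ne (Ne.symm h3), beq_false_of_ne (Ne.symm h4)]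

theorem pv_post_rother (h : Int) (h1 : h ≠ 255) (h2 : h ≠ 220) (h3 : h ≠ 2) (h4 : h ≠ 200) :
    pvPostTable.get? h = none := by
  simp [pvPostTable, PySem.Dict.get?, List.find?, beq_false_of_ne (Ne.symm h1),
    beq_false_of_ne (Ne.symm h2), beq_false_of_ne (Ne.symm h3), beq_false_of_ne (Ne.symm h4)]

theorem pv_bpre_range (ms : List Int) : pvBPre ms = (4, none) ∨ pvBPre ms = (0, some "Potências Centrais") ∨ pvBPre ms = (1, some "Bloco Anglo-Saxão") ∨ pvBPre ms = (2, some "Bloco Franco-Russo") := by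
  unfold pvBPre; split_ifs <;> simp

theorem pv_bpost_range (ms : List Int) : pvBPost ms = (4, none) ∨ pvBPost ms = (0, some "Eixo") ∨ pvBPost ms = (1, some "Aliados") ∨ pvBPost ms = (2, some "Bloco Americano") ∨ pvBPost ms = (3, some "Aliados") := by
  unfold pvBPost; split_ifs <;> simp

theorem pv_hpre_range (h : Int) : pvHPre h = (4, none) ∨ pvHPre h = (0, some "Potências Centrais") ∨ pvHPre h = (1, some "Bloco Anglo-Saxão") ∨ pvHPre h = (2, some "Bloco Franco-Russo") :=
  pv_bpre_range [h]

theorem pv_hpost_range (h : Int) : pvHPost h = (4, none) ∨ pvHPost h = (0, some "Eixo") ∨ pvHPost h = (1, some "Aliados") ∨ pvHPost h = (2, some "Bloco Americano") ∨ pvHPost h = (3, some "Aliados") :=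
  pv_bpost_range [h]

theorem pv_gpre_step (a : Int × Option String) (h : Int)
    (ha : a = (4, none) ∨ a = (0, some "Potências Centrais") ∨ a = (1, some "Bloco Anglo-Saxão") ∨ a = (2, some "Bloco Franco-Russo")) :
    pvGPre a h = if (pvHPre h).1 < a.1 then pvHPre h else a := by
  unfold pvGPre
  by_cases h1 : h = 255
  · subst h1; rw [show pvPreTable.get? 255 = some (0, "Potências Centrais") from rfl]
    simp [pvHPre, pvBPre]
  by_cases h2 : h = 200
  · subst h2; rw [show pvPreTable.get? 200 = some (1, "Bloco Anglo-Saxão") from rfl]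
    simp [pvHPre, pvBPre]
  by_cases h3 : h = 220
  · subst h3; rw [show pvPreTable.get? 220 = some (2, "Bloco Franco-Russo") from rfl]
    simp [pvHPre, pvBPre]
  by_cases h4 : h = 365
  · subst h4; rw [show pvPreTable.get? 365 = some (2, "Bloco Franco-Russo") from rfl]
    simp [pvHPre, pvBPre]
  · rw [pv_pre_rother h h1 h2 h3 h4]
    rcases ha with rfl | rfl | rfl | rfl <;>
      simp [pvHPre, pvBPre, Ne.symm h1, Ne.symm h2, Ne.symm h3, Ne.symm h4]

theorem pv_gpost_step (a : Int × Option String) (h : Int)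
    (ha : a = (4, none) ∨ a = (0, some "Eixo") ∨ a = (1, some "Aliados") ∨ a = (2, some "Bloco Americano") ∨ a = (3, some "Aliados")) :
    pvGPost a h = if (pvHPost h).1 < a.1 then pvHPost h else a := by
  unfold pvGPost
  by_cases h1 : h = 255
  · subst h1; rw [show pvPostTable.get? 255 = some (0, "Eixo") from rfl]
    simp [pvHPost, pvBPost]
  by_cases h2 : h = 220
  · subst h2; rw [show pvPostTable.get? 220 = some (1, "Aliados") from rfl]
    simp [pvHPost, pvBPost]
  by_cases h3 : h = 2
  · subst h3; rw [show pvPostTable.get? 2 = some (2, "Bloco Americano") from rfl]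
    simp [pvHPost, pvBPost]
  by_cases h4 : h = 200
  · subst h4; rw [show pvPostTable.get? 200 = some (3, "Aliados") from rfl]
    simp [pvHPost, pvBPost]
  · rw [pv_post_rother h h1 h2 h3 h4]
    rcases ha with rfl | rfl | rfl | rfl | rfl <;>
      simp [pvHPost, pvBPost, Ne.symm h1, Ne.symm h2, Ne.symm h3, Ne.symm h4]

theorem pv_bpre_cons (h : Int) (t : List Int) :
    pvBPre (h :: t) = if (pvHPre h).1 ≤ (pvBPre t).1 then pvHPre h else pvBPre t := by
  simp only [pvHPre, pvBPre, List.mem_cons, List.not_mem_nil, or_false]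
  by_cases h1 : (255:Int) = h <;> by_cases h2 : (200:Int) = h <;>
  by_cases h3 : (220:Int) = h <;> by_cases h4 : (365:Int) = h <;>
  by_cases m1 : (255:Int) ∈ t <;> by_cases m2 : (200:Int) ∈ t <;>
  by_cases m3 : (220:Int) ∈ t <;> by_cases m4 : (365:Int) ∈ t <;>
  simp_all

theorem pv_bpost_cons (h : Int) (t : List Int) :
    pvBPost (h :: t) = if (pvHPost h).1 ≤ (pvBPost t).1 then pvHPost h else pvBPost t := by
  simp only [pvHPost, pvBPost, List.mem_cons, List.not_mem_nil, or_false]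
  by_cases h1 : (255:Int) = h <;> by_cases h2 : (220:Int) = h <;>
  by_cases h3 : (2:Int) = h <;> by_cases h4 : (200:Int) = h <;>
  by_cases m1 : (255:Int) ∈ t <;> by_cases m2 : (220:Int) ∈ t <;>
  by_cases m3 : (2:Int) ∈ t <;> by_cases m4 : (200:Int) ∈ t <;>
  (try simp_all) <;> omega

theorem pv_pre_merge (bt hv a : Int × Option String)
    (h1 : bt = (4, none) ∨ bt = (0, some "Potências Centrais") ∨ bt = (1, some "Bloco Anglo-Saxão") ∨ bt = (2, some "Bloco Franco-Russo"))
    (h2 : hv = (4, none) ∨ hv = (0, some "Potências Centrais") ∨ hv = (1, some "Bloco Anglo-Saxão") ∨ hv = (2, some "Bloco Franco-Russo"))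
    (h3 : a = (4, none) ∨ a = (0, some "Potências Centrais") ∨ a = (1, some "Bloco Anglo-Saxão") ∨ a = (2, some "Bloco Franco-Russo")) :
    (if bt.1 < (if hv.1 < a.1 then hv else a).1 then bt else (if hv.1 < a.1 then hv else a))
      = (if (if hv.1 ≤ bt.1 then hv else bt).1 < a.1 then (if hv.1 ≤ bt.1 then hv else bt) else a) := by
  rcases h1 with rfl | rfl | rfl | rfl <;> rcases h2 with rfl | rfl | rfl | rfl <;>
    rcases h3 with rfl | rfl | rfl | rfl <;> decide

theorem pv_post_merge (bt hv a : Int × Option String)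
    (h1 : bt = (4, none) ∨ bt = (0, some "Eixo") ∨ bt = (1, some "Aliados") ∨ bt = (2, some "Bloco Americano") ∨ bt = (3, some "Aliados"))
    (h2 : hv = (4, none) ∨ hv = (0, some "Eixo") ∨ hv = (1, some "Aliados") ∨ hv = (2, some "Bloco Americano") ∨ hv = (3, some "Aliados"))
    (h3 : a = (4, none) ∨ a = (0, some "Eixo") ∨ a = (1, some "Aliados") ∨ a = (2, some "Bloco Americano") ∨ a = (3, some "Aliados")) :
    (if bt.1 < (if hv.1 < a.1 then hv else a).1 then bt else (if hv.1 < a.1 then hv else a))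
      = (if (if hv.1 ≤ bt.1 then hv else bt).1 < a.1 then (if hv.1 ≤ bt.1 then hv else bt) else a) := by
  rcases h1 with rfl | rfl | rfl | rfl | rfl <;> rcases h2 with rfl | rfl | rfl | rfl | rfl <;>
    rcases h3 with rfl | rfl | rfl | rfl | rfl <;> decide

theorem pv_pre_inv (ms : List Int) (a : Int × Option String)
    (ha : a = (4, none) ∨ a = (0, some "Potências Centrais") ∨ a = (1, some "Bloco Anglo-Saxão") ∨ a = (2, some "Bloco Franco-Russo")) :
    ms.foldl pvGPre a = if (pvBPre ms).1 < a.1 then pvBPre ms else a := by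
  induction ms generalizing a with
  | nil => rcases ha with rfl | rfl | rfl | rfl <;> simp [pvBPre]
  | cons h t ih =>
    have hstep : pvGPre a h = (4, none) ∨ pvGPre a h = (0, some "Potências Centrais") ∨ pvGPre a h = (1, some "Bloco Anglo-Saxão") ∨ pvGPre a h = (2, some "Bloco Franco-Russo") := by
      rw [pv_gpre_step a h ha]
      rcases pv_hpre_range h with h2 | h2 | h2 | h2 <;> rw [h2] <;>
        rcases ha with rfl | rfl | rfl | rfl <;> decide
    rw [List.foldl_cons, ih _ hstep, pv_gpre_step a h ha, pv_bpre_cons]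
    exact pv_pre_merge _ _ _ (pv_bpre_range t) (pv_hpre_range h) ha

theorem pv_post_inv (ms : List Int) (a : Int × Option String)
    (ha : a = (4, none) ∨ a = (0, some "Eixo") ∨ a = (1, some "Aliados") ∨ a = (2, some "Bloco Americano") ∨ a = (3, some "Aliados")) :
    ms.foldl pvGPost a = if (pvBPost ms).1 < a.1 then pvBPost ms else a := by
  induction ms generalizing a with
  | nil => rcases ha with rfl | rfl | rfl | rfl | rfl <;> simp [pvBPost]
  | cons h t ih =>
    have hstep : pvGPost a h = (4, none) ∨ pvGPost a h = (0, some "Eixo") ∨ pvGPost a h = (1, some "Aliados") ∨ pvGPost a h = (2, some "Bloco Americano") ∨ pvGPost a h = (3, some "Aliados") := by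
      rw [pv_gpost_step a h ha]
      rcases pv_hpost_range h with h2 | h2 | h2 | h2 | h2 <;> rw [h2] <;>
        rcases ha with rfl | rfl | rfl | rfl | rfl <;> decide
    rw [List.foldl_cons, ih _ hstep, pv_gpost_step a h ha, pv_bpost_cons]
    exact pv_post_merge _ _ _ (pv_bpost_range t) (pv_hpost_range h) ha

theorem pv_pre_fold (ms : List Int) : ms.foldl pvGPre (4, none) = pvBPre ms := by
  rw [pv_pre_inv ms (4, none) (Or.inl rfl)]
  rcases pv_bpre_range ms with h | h | h | h <;> rw [h] <;> decide

theorem pv_post_fold (ms : List Int) : ms.foldl pvGPost (4, none) = pvBPost ms := by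
  rw [pv_post_inv ms (4, none) (Or.inl rfl)]
  rcases pv_bpost_range ms with h | h | h | h | h <;> rw [h] <;> decide

-- the pointwise label agreement, per period, for one community with member list ms
theorem pv_pre_point (c : Int) (ms : List Int) :
    (if PySem.Set.contains (PySem.Set.update PySem.Set.empty ms) 255 then "Potências Centrais"
     else if PySem.Set.contains (PySem.Set.update PySem.Set.empty ms) 200 then "Bloco Anglo-Saxão"
     else if PySem.Set.contains (PySem.Set.update PySem.Set.empty ms) 220 || PySem.Set.contains (PySem.Set.update PySem.Set.empty ms) 365 then "Bloco Franco-Russo"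
     else "Comunidade " ++ PySem.Int.toStr c)
      = (match (ms.foldl pvGPre (4, none)).2 with
         | some l => l
         | none => "Comunidade " ++ PySem.Int.toStr c) := by
  rw [pv_pre_fold]
  by_cases m1 : (255:Int) ∈ ms <;> by_cases m2 : (200:Int) ∈ ms <;>
  by_cases m3 : (220:Int) ∈ ms <;> by_cases m4 : (365:Int) ∈ ms <;>
  simp_all [pvBPre, PySem.Set.mem_update]

theorem pv_post_point (c : Int) (ms : List Int) :
    (if PySem.Set.contains (PySem.Set.update PySem.Set.empty ms) 255 then "Eixo"
     else if PySem.Set.contains (PySem.Set.update PySem.Set.empty ms) 2 && !PySem.Set.contains (PySem.Set.update PySem.Set.empty ms) 220 then "Bloco Americano"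
     else if PySem.Set.contains (PySem.Set.update PySem.Set.empty ms) 220 || PySem.Set.contains (PySem.Set.update PySem.Set.empty ms) 200 then "Aliados"
     else "Comunidade " ++ PySem.Int.toStr c)
      = (match (ms.foldl pvGPost (4, none)).2 with
         | some l => l
         | none => "Comunidade " ++ PySem.Int.toStr c) := by
  rw [pv_post_fold]
  by_cases m1 : (255:Int) ∈ ms <;> by_cases m2 : (2:Int) ∈ ms <;>
  by_cases m3 : (220:Int) ∈ ms <;> by_cases m4 : (200:Int) ∈ ms <;>
  simp_all [pvBPost, PySem.Set.mem_update]

-- ===== VERDICT (by name: the statement is the Claim_ definition above) =====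
theorem identify_blocs_py_spec : Claim_equal_identify_blocs_py := by
  intro partition period _ hpre
  unfold Spec_identify_blocs_py identify_blocs_py identify_blocs_py_alt
  set cm := partition.foldl (fun d p => d.insert p.2 (PySem.Set.add (d.getD p.2 PySem.Set.empty) p.1)) PySem.Dict.empty with hcm
  set best := partition.foldl (pvStep (pvRankTable period)) PySem.Dict.empty with hbest
  dsimp only
  have hcmnd : cm.keys.Nodup :=
    PySem.Dict.nodup_keys_foldl_insert_key partition Prod.snd _ PySem.Dict.empty (by simp)
  have hbnd : best.keys.Nodup :=
    PySem.Dict.nodup_keys_foldl_insert_key partition Prod.snd _ PySem.Dict.empty (by simp)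
  have hcmk : cm.keys = PySem.Set.update [] (partition.map Prod.snd) := by
    rw [hcm, PySem.Dict.keys_foldl_insert_key]; simp
  have hbk : best.keys = PySem.Set.update [] (partition.map Prod.snd) := by
    have h := PySem.Dict.keys_foldl_insert_key (l := partition) (key := Prod.snd)
      (f := fun (b : PySem.Dict Int (Int × Option String)) (p : Int × Int) =>
        match (pvRankTable period).get? p.1 with
        | some r => if r.1 < (b.getD p.2 (4, none)).1 then (r.1, some r.2) else b.getD p.2 (4, none)
        | none => b.getD p.2 (4, none)) (d := PySem.Dict.empty)
    simpa using h
  have hcmnd' : (cm.items.map Prod.fst).Nodup := by simpa [PySem.Dict.keys] using hcmnd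
  -- B side: items of best as a map over the keys, values given by the per-community min fold
  have hbitems : best.items = best.keys.map (fun c => (c, ((partition.filter (fun p => p.2 == c)).map Prod.fst).foldl
      (fun old n => match (pvRankTable period).get? n with
        | some r => if r.1 < old.1 then (r.1, some r.2) else old
        | none => old) (4, none))) := by
    rw [PySem.Dict.items_eq_map_keys best hbnd (4, none)]
    apply List.map_congr_left
    intro c _
    rw [hbest, pv_step_getD (pvRankTable period) partition PySem.Dict.empty c, PySem.Dict.getD_empty]
  -- A side: items of cm as a map over the keys, values = member sets
  have hcmitems : cm.items = cm.keys.map (fun c => (c, PySem.Set.update PySem.Set.empty ((partition.filter (fun p => p.2 == c)).map Prod.fst))) := by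
    rw [PySem.Dict.items_eq_map_keys cm hcmnd PySem.Set.empty]
    apply List.map_congr_left
    intro c _
    rw [hcm, pv_group_getD, PySem.Dict.getD_empty]
  by_cases hper : period = "pre_wwi"
  · rw [if_pos hper]
    have hfun : (fun (bn : PySem.Dict Int String) (p : Int × PySem.Set Int) =>
        if PySem.Set.contains p.2 255 then bn.insert p.1 "Potências Centrais"
        else if PySem.Set.contains p.2 200 then bn.insert p.1 "Bloco Anglo-Saxão"
        else if PySem.Set.contains p.2 220 || PySem.Set.contains p.2 365 then bn.insert p.1 "Bloco Franco-Russo"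
        else bn.insert p.1 ("Comunidade " ++ PySem.Int.toStr p.1))
        = fun bn p => bn.insert p.1
            (if PySem.Set.contains p.2 255 then "Potências Centrais"
             else if PySem.Set.contains p.2 200 then "Bloco Anglo-Saxão"
             else if PySem.Set.contains p.2 220 || PySem.Set.contains p.2 365 then "Bloco Franco-Russo"
             else "Comunidade " ++ PySem.Int.toStr p.1) := by
      funext bn p; split_ifs <;> rfl
    rw [hfun, pv_fold_label cm.items hcmnd'
        (fun c m => if PySem.Set.contains m 255 then "Potências Centrais"
             else if PySem.Set.contains m 200 then "Bloco Anglo-Saxão"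
             else if PySem.Set.contains m 220 || PySem.Set.contains m 365 then "Bloco Franco-Russo"
             else "Comunidade " ++ PySem.Int.toStr c)]
    rw [hcmitems, hbitems, List.map_map, List.map_map, hcmk, hbk]
    apply List.map_congr_left
    intro c _
    dsimp only [Function.comp]
    have hG : (fun (old : Int × Option String) (n : Int) =>
        match (pvRankTable period).get? n with
        | some r => if r.1 < old.1 then (r.1, some r.2) else old
        | none => old) = pvGPre := by
      funext old n; rw [hper]; rfl
    rw [hG]
    exact congrArg (fun s => (c, s)) (pv_pre_point c _)
  · rw [if_neg hper]
    have hfun : (fun (bn : PySem.Dict Int String) (p : Int × PySem.Set Int) =>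
        if PySem.Set.contains p.2 255 then bn.insert p.1 "Eixo"
        else if PySem.Set.contains p.2 2 && !PySem.Set.contains p.2 220 then bn.insert p.1 "Bloco Americano"
        else if PySem.Set.contains p.2 220 || PySem.Set.contains p.2 200 then bn.insert p.1 "Aliados"
        else bn.insert p.1 ("Comunidade " ++ PySem.Int.toStr p.1))
        = fun bn p => bn.insert p.1
            (if PySem.Set.contains p.2 255 then "Eixo"
             else if PySem.Set.contains p.2 2 && !PySem.Set.contains p.2 220 then "Bloco Americano"
             else if PySem.Set.contains p.2 220 || PySem.Set.contains p.2 200 then "Aliados"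
             else "Comunidade " ++ PySem.Int.toStr p.1) := by
      funext bn p; split_ifs <;> rfl
    rw [hfun, pv_fold_label cm.items hcmnd'
        (fun c m => if PySem.Set.contains m 255 then "Eixo"
             else if PySem.Set.contains m 2 && !PySem.Set.contains m 220 then "Bloco Americano"
             else if PySem.Set.contains m 220 || PySem.Set.contains m 200 then "Aliados"
             else "Comunidade " ++ PySem.Int.toStr c)]
    rw [hcmitems, hbitems, List.map_map, List.map_map, hcmk, hbk]
    apply List.map_congr_left
    intro c _
    dsimp only [Function.comp]
    have hG : (fun (old : Int × Option String) (n : Int) =>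
        match (pvRankTable period).get? n with
        | some r => if r.1 < old.1 then (r.1, some r.2) else old
        | none => old) = pvGPost := by
      funext old n
      have h2 : pvRankTable period = pvPostTable := by rw [pvRankTable, if_neg hper]
      rw [h2]
      rfl
    rw [hG]
    exact congrArg (fun s => (c, s)) (pv_post_point c _)
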